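-- pv_equiv track=rewrite | github.com/Native-Planet/GroundSeg | api/config/config.py | check_patp
-- ===== SOURCE A (Python) =====
-- def check_patp(patp):
--     # Make sure patp is string
--     if type(patp) != str:
--         return False
--
--     # Remove sig from patp
--     if patp.startswith("~"):
--         patp = patp[1:]
--
--     # patps cannot start with doz
--     if patp.startswith("doz"):
--         return False
--
--     # valid
--     pre = "dozmarbinwansamlitsighidfidlissogdirwacsabwissibrigsoldopmodfoglidhopdardorlorhodfolrintogsilmirholpaslacrovlivdalsatlibtabhanticpidtorbolfosdotlosdilforpilramtirwintadbicdifrocwidbisdasmidloprilnardapmolsanlocnovsitnidtipsicropwitnatpanminritpodmottamtolsavposnapnopsomfinfonbanmorworsipronnorbotwicsocwatdolmagpicdavbidbaltimtasmalligsivtagpadsaldivdactansidfabtarmonranniswolmispallasdismaprabtobrollatlonnodnavfignomnibpagsopralbilhaddocridmocpacravripfaltodtiltinhapmicfanpattaclabmogsimsonpinlomrictapfirhasbosbatpochactidhavsaplindibhosdabbitbarracparloddosbortochilmactomdigfilfasmithobharmighinradmashalraglagfadtopmophabnilnosmilfopfamdatnoldinhatnacrisfotribhocnimlarfitwalrapsa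rnalmoslandondanladdovrivbacpollaptalpitnambonrostonfodponsovnocsorlavmatmipfip"
--     suf = "zodnecbudwessevpersutletfulpensytdurwepserwylsunrypsyxdyrnuphebpeglupdepdysputlughecryttyvsydnexlunmeplutseppesdelsulpedtemledtulmetwenbynhexfebpyldulhetmevruttylwydtepbesdexsefwycburderneppurrysrebdennutsubpetrulsynregtydsupsemwynrecmegnetsecmulnymtevwebsummutnyxrextebfushepbenmuswyxsymselrucdecwexsyrwetdylmynmesdetbetbeltuxtugmyrpelsyptermebsetdutdegtexsurfeltudnuxruxrenwytnubmedlytdusnebrumtynseglyxpunresredfunrevrefmectedrusbexlebduxrynnumpyxrygryxfeptyrtustyclegnemfermertenlusnussyltecmexpubrymtucfyllepdebbermughuttunbylsudpemdevlurdefbusbeprunmelpexdytbyttyplevmylwedducfurfexnulluclennerlexrupnedlecrydlydfenwelnydhusrelrudneshesfetdesretdunlernyrsebhulrylludremlysfynwerrycsugnysnyllyndyndemluxfedsedbecmunlyrtesmudnytbyrsenwegfyrmurtelreptegpecnelnevfes"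
--
--     # convert to array
--     pre = [pre[i:i+3] for i in range(0, len(pre), 3)]
--     suf = [suf[i:i+3] for i in range(0, len(suf), 3)]
--
--     # Galaxy check
--     if len(patp) == 3:
--         return patp in suf
--
--     # Split patp
--     patp = patp.split("-")
--
--     # Check if valid
--     for p in patp:
--         if len(p) == 6:
--             if p[:3] not in pre:
--                 return False
--             if p[3:] not in suf:
--                 return False
--         else:
--             return False
--     return True
-- ===== SOURCE B (Python) =====
-- def check_patp(patp):
--     # B: one left-to-right scan consuming pre+suf(+dash) seven chars at a time,
--     # against syllable sets built once by a recursive-style 3-chunker; no split() pass.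
--     if type(patp) != str:
--         return False
--     if patp.startswith("~"):
--         patp = patp[1:]
--     if patp.startswith("doz"):
--         return False
--     pre = "dozmarbinwansamlitsighidfidlissogdirwacsabwissibrigsoldopmodfoglidhopdardorlorhodfolrintogsilmirholpaslacrovlivdalsatlibtabhanticpidtorbolfosdotlosdilforpilramtirwintadbicdifrocwidbisdasmidloprilnardapmolsanlocnovsitnidtipsicropwitnatpanminritpodmottamtolsavposnapnopsomfinfonbanmorworsipronnorbotwicsocwatdolmagpicdavbidbaltimtasmalligsivtagpadsaldivdactansidfabtarmonranniswolmispallasdismaprabtobrollatlonnodnavfignomnibpagsopralbilhaddocridmocpacravripfaltodtiltinhapmicfanpattaclabmogsimsonpinlomrictapfirhasbosbatpochactidhavsaplindibhosdabbitbarracparloddosbortochilmactomdigfilfasmithobharmighinradmashalraglagfadtopmophabnilnosmilfopfamdatnoldinhatnacrisfotribhocnimlarfitwalrapsarnalmoslandondanladdovrivbacpollaptalpitnambonrostonfodponsovnocsorlavmatmipfip"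
--     suf = "zodnecbudwessevpersutletfulpensytdurwepserwylsunrypsyxdyrnuphebpeglupdepdysputlughecryttyvsydnexlunmeplutseppesdelsulpedtemledtulmetwenbynhexfebpyldulhetmevruttylwydtepbesdexsefwycburderneppurrysrebdennutsubpetrulsynregtydsupsemwynrecmegnetsecmulnymtevwebsummutnyxrextebfushepbenmuswyxsymselrucdecwexsyrwetdylmynmesdetbetbeltuxtugmyrpelsyptermebsetdutdegtexsurfeltudnuxruxrenwytnubmedlytdusnebrumtynseglyxpunresredfunrevrefmectedrusbexlebduxrynnumpyxrygryxfeptyrtustyclegnemfermertenlusnussyltecmexpubrymtucfyllepdebbermughuttunbylsudpemdevlurdefbusbeprunmelpexdytbyttyplevmylwedducfurfexnulluclennerlexrupnedlecrydlydfenwelnydhusrelrudneshesfetdesretdunlernyrsebhulrylludremlysfynwerrycsugnysnyllyndyndemluxfedsedbecmunlyrtesmudnytbyrsenwegfyrmurtelreptegpecnelnevfes"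
--
--     def chunks3(s):
--         out = []
--         while s:
--             out.append(s[:3])
--             s = s[3:]
--         return out
--
--     pre_set = set(chunks3(pre))
--     suf_set = set(chunks3(suf))
--     if len(patp) == 3:
--         return patp in suf_set
--     s = patp
--     while True:
--         if len(s) < 6 or "-" in s[:6]:
--             return False
--         if s[:3] not in pre_set:
--             return False
--         if s[3:6] not in suf_set:
--             return False
--         if len(s) == 6:
--             return True
--         if s[6] != "-":
--             return False
--         s = s[7:]
-- ===== Notes on version B (the rewrite author's own statement) =====
-- stated objective: alternative
-- what changed: B replaces A's split-on-dash pass plus per-segment linear scans of the syllable lists by a single left-to-right scan that consumes pre+suf(+dash) seven characters at a time against hash sets of syllables built once by a 3-chunker.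
import Mathlib
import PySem

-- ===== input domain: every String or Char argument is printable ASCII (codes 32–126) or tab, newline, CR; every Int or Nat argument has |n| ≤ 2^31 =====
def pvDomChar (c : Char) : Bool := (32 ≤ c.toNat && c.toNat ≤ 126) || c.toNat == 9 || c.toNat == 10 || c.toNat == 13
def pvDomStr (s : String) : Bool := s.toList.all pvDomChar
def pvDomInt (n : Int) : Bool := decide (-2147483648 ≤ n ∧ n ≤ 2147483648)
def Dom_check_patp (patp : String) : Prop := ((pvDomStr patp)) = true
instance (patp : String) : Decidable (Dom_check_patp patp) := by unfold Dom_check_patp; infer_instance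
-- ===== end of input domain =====

-- B replaces A's split-on-dash pass and per-segment linear table scans by one
-- left-to-right scan consuming seven characters at a time against syllable sets (alternative).

-- ===== PORT A =====
-- the two 768-character syllable tables (A's `pre`/`suf` string constants)
def aPreStr : String := "dozmarbinwansamlitsighidfidlissogdirwacsabwissibrigsoldopmodfoglidhopdardorlorhodfolrintogsilmirholpaslacrovlivdalsatlibtabhanticpidtorbolfosdotlosdilforpilramtirwintadbicdifrocwidbisdasmidloprilnardapmolsanlocnovsitnidtipsicropwitnatpanminritpodmottamtolsavposnapnopsomfinfonbanmorworsipronnorbotwicsocwatdolmagpicdavbidbaltimtasmalligsivtagpadsaldivdactansidfabtarmonranniswolmispallasdismaprabtobrollatlonnodnavfignomnibpagsopralbilhaddocridmocpacravripfaltodtiltinhapmicfanpattaclabmogsimsonpinlomrictapfirhasbosbatpochactidhavsaplindibhosdabbitbarracparloddosbortochilmactomdigfilfasmithobharmighinradmashalraglagfadtopmophabnilnosmilfopfamdatnoldinhatnacrisfotribhocnimlarfitwalrapsarnalmoslandondanladdovrivbacpollaptalpitnambonrostonfodponsovnocsorlavmatmipfip"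
def aSufStr : String := "zodnecbudwessevpersutletfulpensytdurwepserwylsunrypsyxdyrnuphebpeglupdepdysputlughecryttyvsydnexlunmeplutseppesdelsulpedtemledtulmetwenbynhexfebpyldulhetmevruttylwydtepbesdexsefwycburderneppurrysrebdennutsubpetrulsynregtydsupsemwynrecmegnetsecmulnymtevwebsummutnyxrextebfushepbenmuswyxsymselrucdecwexsyrwetdylmynmesdetbetbeltuxtugmyrpelsyptermebsetdutdegtexsurfeltudnuxruxrenwytnubmedlytdusnebrumtynseglyxpunresredfunrevrefmectedrusbexlebduxrynnumpyxrygryxfeptyrtustyclegnemfermertenlusnussyltecmexpubrymtucfyllepdebbermughuttunbylsudpemdevlurdefbusbeprunmelpexdytbyttyplevmylwedducfurfexnulluclennerlexrupnedlecrydlydfenwelnydhusrelrudneshesfetdesretdunlernyrsebhulrylludremlysfynwerrycsugnysnyllyndyndemluxfedsedbecmunlyrtesmudnytbyrsenwegfyrmurtelreptegpecnelnevfes"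

-- "Remove sig from patp": `if patp.startswith("~"): patp = patp[1:]`
def aStrip (s : List Char) : List Char :=
  if PySem.Chars.startswith s ['~'] then PySem.List.slice s (some 1) none else s

-- A's `[pre[i:i+3] for i in range(0, len(pre), 3)]`
def aPreTab : List (List Char) :=
  (PySem.List.pyRange 0 (PySem.Chars.len aPreStr.toList) 3).map
    (fun i => PySem.List.slice aPreStr.toList (some i) (some (i + 3)))
def aSufTab : List (List Char) :=
  (PySem.List.pyRange 0 (PySem.Chars.len aSufStr.toList) 3).map
    (fun i => PySem.List.slice aSufStr.toList (some i) (some (i + 3)))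

-- A's `for p in patp:` loop over the split segments, with its early returns
def aLoop : List (List Char) → Bool
  | [] => true
  | p :: rest =>
    if PySem.Chars.len p == 6 then
      if !(aPreTab.contains (PySem.List.slice p none (some 3))) then false
      else if !(aSufTab.contains (PySem.List.slice p (some 3) none)) then false
      else aLoop rest
    else false

-- the `type(patp) != str` guard cannot fire (the argument is a String here)
def check_patp (patp : String) : Bool :=
  if PySem.Chars.startswith (aStrip patp.toList) ['d', 'o', 'z'] then false
  else if PySem.Chars.len (aStrip patp.toList) == 3 then
    aSufTab.contains (aStrip patp.toList)
  else aLoop (PySem.Chars.splitOn (aStrip patp.toList) ['-'])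

-- ===== PORT B =====
def bPreStr : String := "dozmarbinwansamlitsighidfidlissogdirwacsabwissibrigsoldopmodfoglidhopdardorlorhodfolrintogsilmirholpaslacrovlivdalsatlibtabhanticpidtorbolfosdotlosdilforpilramtirwintadbicdifrocwidbisdasmidloprilnardapmolsanlocnovsitnidtipsicropwitnatpanminritpodmottamtolsavposnapnopsomfinfonbanmorworsipronnorbotwicsocwatdolmagpicdavbidbaltimtasmalligsivtagpadsaldivdactansidfabtarmonranniswolmispallasdismaprabtobrollatlonnodnavfignomnibpagsopralbilhaddocridmocpacravripfaltodtiltinhapmicfanpattaclabmogsimsonpinlomrictapfirhasbosbatpochactidhavsaplindibhosdabbitbarracparloddosbortochilmactomdigfilfasmithobharmighinradmashalraglagfadtopmophabnilnosmilfopfamdatnoldinhatnacrisfotribhocnimlarfitwalrapsarnalmoslandondanladdovrivbacpollaptalpitnambonrostonfodponsovnocsorlavmatmipfip"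
def bSufStr : String := "zodnecbudwessevpersutletfulpensytdurwepserwylsunrypsyxdyrnuphebpeglupdepdysputlughecryttyvsydnexlunmeplutseppesdelsulpedtemledtulmetwenbynhexfebpyldulhetmevruttylwydtepbesdexsefwycburderneppurrysrebdennutsubpetrulsynregtydsupsemwynrecmegnetsecmulnymtevwebsummutnyxrextebfushepbenmuswyxsymselrucdecwexsyrwetdylmynmesdetbetbeltuxtugmyrpelsyptermebsetdutdegtexsurfeltudnuxruxrenwytnubmedlytdusnebrumtynseglyxpunresredfunrevrefmectedrusbexlebduxrynnumpyxrygryxfeptyrtustyclegnemfermertenlusnussyltecmexpubrymtucfyllepdebbermughuttunbylsudpemdevlurdefbusbeprunmelpexdytbyttyplevmylwedducfurfexnulluclennerlexrupnedlecrydlydfenwelnydhusrelrudneshesfetdesretdunlernyrsebhulrylludremlysfynwerrycsugnysnyllyndyndemluxfedsedbecmunlyrtesmudnytbyrsenwegfyrmurtelreptegpecnelnevfes"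

def bStrip (s : List Char) : List Char :=
  if PySem.Chars.startswith s ['~'] then PySem.List.slice s (some 1) none else s

-- B's `chunks3` while loop, one fuel unit per iteration (fuel := length is ample,
-- each iteration consumes three characters); s[:3]/s[3:] are take/drop (nonnegative slices)
def bChunks3 : Nat → List Char → List (List Char)
  | 0, _ => []
  | _, [] => []
  | n + 1, s => s.take 3 :: bChunks3 n (s.drop 3)

-- B's syllable sets (`set(chunks3(pre))`)
def bPreSet : PySem.Set (List Char) :=
  PySem.Set.ofList (bChunks3 bPreStr.toList.length bPreStr.toList)
def bSufSet : PySem.Set (List Char) :=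
  PySem.Set.ofList (bChunks3 bSufStr.toList.length bSufStr.toList)

-- B's main while loop, ported with a fuel counter (one unit per iteration; fuel := length is
-- always enough, since each iteration either returns or consumes seven characters);
-- the short-circuit `or` of the first Python condition becomes two nested ifs
def bScan : Nat → List Char → Bool
  | 0, _ => false
  | fuel + 1, s =>
    if s.length < 6 then false
    else if PySem.Chars.isIn ['-'] (PySem.List.slice s none (some 6)) then false
    else if !(PySem.Set.contains bPreSet (PySem.List.slice s none (some 3))) then false
    else if !(PySem.Set.contains bSufSet (PySem.List.slice s (some 3) (some 6))) then false
    else if s.length == 6 then true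
    else if !(PySem.List.pyGet? s 6 == some '-') then false
    else bScan fuel (PySem.List.slice s (some 7) none)

def check_patp_alt (patp : String) : Bool :=
  if PySem.Chars.startswith (bStrip patp.toList) ['d', 'o', 'z'] then false
  else if (bStrip patp.toList).length == 3 then
    PySem.Set.contains bSufSet (bStrip patp.toList)
  else bScan (bStrip patp.toList).length (bStrip patp.toList)

-- ===== PRECONDITION & SPEC =====
def Spec_check_patp (patp : String) (out : Bool) : Prop := out = check_patp_alt patp
instance (patp : String) (out : Bool) : Decidable (Spec_check_patp patp out) := by unfold Spec_check_patp; infer_instance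

-- ===== CLAIM (what is proved, stated in full; the proofs are below) =====
def Claim_equal_check_patp : Prop := ∀ (patp : String), Dom_check_patp patp → Spec_check_patp patp (check_patp patp)

-- ===== LEMMAS AND PROOFS =====

-- numeral toNat facts used when unfolding slices
lemma pvT3 : ((3 : Int)).toNat = 3 := rfl
lemma pvT6 : ((6 : Int)).toNat = 6 := rfl
lemma pvT7 : ((7 : Int)).toNat = 7 := rfl

lemma bStrip_eq_aStrip (s : List Char) : bStrip s = aStrip s := rfl

-- one-step equations of the two loops, in if-form
lemma aLoop_cons (p : List Char) (rest : List (List Char)) :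
    aLoop (p :: rest) =
      if PySem.Chars.len p == 6 then
        if !(aPreTab.contains (PySem.List.slice p none (some 3))) then false
        else if !(aSufTab.contains (PySem.List.slice p (some 3) none)) then false
        else aLoop rest
      else false := rfl

lemma bScan_succ (fuel : Nat) (s : List Char) :
    bScan (fuel + 1) s =
      if s.length < 6 then false
      else if PySem.Chars.isIn ['-'] (PySem.List.slice s none (some 6)) then false
      else if !(PySem.Set.contains bPreSet (PySem.List.slice s none (some 3))) then false
      else if !(PySem.Set.contains bSufSet (PySem.List.slice s (some 3) (some 6))) then false
      else if s.length == 6 then true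
      else if !(PySem.List.pyGet? s 6 == some '-') then false
      else bScan fuel (PySem.List.slice s (some 7) none) := rfl

-- B's chunker agrees with A's range/slice comprehension (generic, then applied to the tables)
lemma bChunks3_nil (f : Nat) : bChunks3 f [] = [] := by cases f <;> rfl

lemma bChunks3_eq_rangeMap : ∀ (m f : Nat) (L : List Char),
    L.length ≤ f → L.length ≤ 3 * m → 3 * m < L.length + 3 →
    (List.range m).map (fun k => (L.drop (3 * k)).take 3) = bChunks3 f L := by
  intro m
  induction m with
  | zero =>
    intro f L _ h2 _
    have hL : L = [] := by
      cases L with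
      | nil => rfl
      | cons a t => simp at h2
    subst hL
    rw [bChunks3_nil]
    simp
  | succ n ih =>
    intro f L hf h2 h3
    have hLne : L ≠ [] := by
      rintro rfl
      simp at h3
    have hpos : 0 < L.length := List.length_pos_of_ne_nil hLne
    obtain ⟨f', rfl⟩ : ∃ f', f = f' + 1 := ⟨f - 1, by omega⟩
    have hstep : bChunks3 (f' + 1) L = L.take 3 :: bChunks3 f' (L.drop 3) := by
      cases L with
      | nil => exact absurd rfl hLne
      | cons c t => rfl
    rw [hstep, List.range_succ_eq_map, List.map_cons, List.map_map]
    refine congrArg₂ (· :: ·) ?_ ?_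
    · simp
    · rw [← ih f' (L.drop 3) (by simp only [List.length_drop]; omega)
        (by simp only [List.length_drop]; omega) (by simp only [List.length_drop]; omega)]
      apply List.map_congr_left
      intro k _
      simp only [Function.comp, List.drop_drop]
      congr 2
      omega

lemma rangeSlice_eq_chunks (L : List Char) :
    (PySem.List.pyRange 0 (PySem.Chars.len L) 3).map
      (fun i => PySem.List.slice L (some i) (some (i + 3)))
    = bChunks3 L.length L := by
  rw [PySem.Chars.len_eq, PySem.List.pyRange_of_pos 0 ((L.length : Int)) (by norm_num)]
  by_cases hL : L.length = 0
  · have hnil : L = [] := List.eq_nil_of_length_eq_zero hL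
    subst hnil
    rw [bChunks3_nil]
    simp
  · have hlt : (0 : Int) < (L.length : Int) := by exact_mod_cast Nat.pos_of_ne_zero hL
    rw [if_pos hlt]
    have hm : (((L.length : Int) - 0 + 3 - 1) / 3).toNat = (L.length + 2) / 3 := by omega
    rw [hm, List.map_map]
    have hmap : ∀ k ∈ List.range ((L.length + 2) / 3),
        ((fun i => PySem.List.slice L (some i) (some (i + 3))) ∘ fun k : Nat => 0 + 3 * (k : Int)) k
        = (L.drop (3 * k)).take 3 := by
      intro k _
      simp only [Function.comp, zero_add]
      rw [PySem.List.slice_toNat L (by positivity) (by positivity)]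
      have e1 : (3 * (k:Int)).toNat = 3 * k := by omega
      have e2 : (3 * (k:Int) + 3).toNat = 3 * k + 3 := by omega
      rw [e1, e2]
      congr 1
      omega
    rw [List.map_congr_left hmap]
    exact bChunks3_eq_rangeMap ((L.length + 2) / 3) L.length L le_rfl (by omega) (by omega)

lemma aPreTab_eq : aPreTab = bChunks3 bPreStr.toList.length bPreStr.toList :=
  rangeSlice_eq_chunks aPreStr.toList
lemma aSufTab_eq : aSufTab = bChunks3 bSufStr.toList.length bSufStr.toList :=
  rangeSlice_eq_chunks aSufStr.toList

-- membership in B's sets is membership in A's chunk lists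
lemma bPreSet_contains (x : List Char) :
    PySem.Set.contains bPreSet x = aPreTab.contains x := by
  rw [aPreTab_eq, show bPreSet = PySem.Set.ofList (bChunks3 bPreStr.toList.length bPreStr.toList) from rfl,
    PySem.Set.contains_eq_listContains, Bool.eq_iff_iff, List.contains_iff_mem,
    List.contains_iff_mem, PySem.Set.mem_ofList]

lemma bSufSet_contains (x : List Char) :
    PySem.Set.contains bSufSet x = aSufTab.contains x := by
  rw [aSufTab_eq, show bSufSet = PySem.Set.ofList (bChunks3 bSufStr.toList.length bSufStr.toList) from rfl,
    PySem.Set.contains_eq_listContains, Bool.eq_iff_iff, List.contains_iff_mem,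
    List.contains_iff_mem, PySem.Set.mem_ofList]

-- split on '-' as a plain structural recursion: first piece, later pieces
def pvSplitDash : List Char → List Char × List (List Char)
  | [] => ([], [])
  | a :: t =>
    let p := pvSplitDash t
    if a = '-' then ([], p.1 :: p.2) else (a :: p.1, p.2)

lemma pvSplitDash_go (fuel : Nat) : ∀ (l cur : List Char) (acc : List (List Char)),
    l.length ≤ fuel →
    PySem.Chars.splitOn.go ['-'] fuel l cur acc
      = acc.reverse ++ ((cur.reverse ++ (pvSplitDash l).1) :: (pvSplitDash l).2) := by
  induction fuel with
  | zero =>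
    intro l cur acc h
    have hl : l = [] := by cases l <;> simp_all
    subst hl
    simp [PySem.Chars.splitOn.go, pvSplitDash]
  | succ n ih =>
    intro l cur acc h
    cases l with
    | nil => simp [PySem.Chars.splitOn.go, pvSplitDash]
    | cons c rest =>
      by_cases hc : c = '-'
      · subst hc
        have hpre : (['-'] : List Char).isPrefixOf ('-' :: rest) = true := by
          simp [List.isPrefixOf]
        simp only [PySem.Chars.splitOn.go]
        rw [if_pos hpre]
        rw [ih (List.drop (['-'] : List Char).length ('-' :: rest)) [] (cur.reverse :: acc)
          (by simp at h ⊢; omega)]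
        simp [pvSplitDash]
      · have hbeq : (('-' : Char) == c) = false := beq_eq_false_iff_ne.mpr (Ne.symm hc)
        have hpre : (['-'] : List Char).isPrefixOf (c :: rest) = false := by
          simp [List.isPrefixOf, hbeq]
        simp only [PySem.Chars.splitOn.go]
        rw [if_neg (by simp [hpre])]
        rw [ih rest (c :: cur) acc (by simp at h; omega)]
        simp [pvSplitDash, hc]

lemma pvSplitOn_dash (s : List Char) :
    PySem.Chars.splitOn s ['-'] = (pvSplitDash s).1 :: (pvSplitDash s).2 := by
  unfold PySem.Chars.splitOn
  rw [pvSplitDash_go (s.length + 1) s [] [] (by omega)]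
  simp

lemma pvSplitDash_no_dash (s : List Char) (h : ('-' : Char) ∉ s) : pvSplitDash s = (s, []) := by
  induction s with
  | nil => rfl
  | cons a t ih =>
    have ha : a ≠ '-' := by rintro rfl; exact h (by simp)
    simp [pvSplitDash, ha, ih (fun hm => h (by simp [hm]))]

lemma pvSplitDash_append (u v : List Char) (h : ('-' : Char) ∉ u) :
    pvSplitDash (u ++ '-' :: v) = (u, (pvSplitDash v).1 :: (pvSplitDash v).2) := by
  induction u with
  | nil => simp [pvSplitDash]
  | cons a t ih =>
    have ha : a ≠ '-' := by rintro rfl; exact h (by simp)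
    rw [List.cons_append]
    simp [pvSplitDash, ha, ih (fun hm => h (by simp [hm]))]

-- a one-character needle is in a string iff the character is an element
lemma pvSingletonInfix (c : Char) (l : List Char) : [c] <:+: l ↔ c ∈ l := by
  constructor
  · intro h
    exact h.subset (List.mem_singleton_self c)
  · intro h
    obtain ⟨s, t, rfl⟩ := List.append_of_mem h
    exact ⟨s, t, by simp⟩

lemma pvIsInWin_true (s : List Char) (h : ('-' : Char) ∈ PySem.List.slice s none (some 6)) :
    PySem.Chars.isIn ['-'] (PySem.List.slice s none (some 6)) = true :=
  (PySem.Chars.isIn_iff_infix _ _).mpr ((pvSingletonInfix _ _).mpr h)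

lemma pvIsInWin_false (s : List Char) (h : ('-' : Char) ∉ PySem.List.slice s none (some 6)) :
    PySem.Chars.isIn ['-'] (PySem.List.slice s none (some 6)) = false :=
  (PySem.Chars.isIn_eq_false_iff _ _).mpr (fun hin => h ((pvSingletonInfix _ _).mp hin))

-- bScan short-circuit shapes (pure rewriting; nothing here evaluates the tables)
lemma pvNotFT : ¬ ((false : Bool) = true) := by simp

lemma bScan_false_win (n : Nat) (s : List Char)
    (h : ('-' : Char) ∈ PySem.List.slice s none (some 6)) :
    bScan (n + 1) s = false := by
  by_cases h1 : s.length < 6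
  · rw [bScan_succ, if_pos h1]
  · rw [bScan_succ, if_neg h1, pvIsInWin_true s h]
    rfl

lemma bScan_false_get (n : Nat) (s : List Char) (hne : s.length ≠ 6)
    (hwin : ('-' : Char) ∉ PySem.List.slice s none (some 6))
    (h : PySem.List.pyGet? s 6 ≠ some '-') :
    bScan (n + 1) s = false := by
  by_cases h1 : s.length < 6
  · rw [bScan_succ, if_pos h1]
  · have h6 : (s.length == 6) = false := beq_eq_false_iff_ne.mpr hne
    have hg : (PySem.List.pyGet? s 6 == some '-') = false := beq_eq_false_iff_ne.mpr h
    rw [bScan_succ, if_neg h1, pvIsInWin_false s hwin, if_neg pvNotFT]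
    cases hp : PySem.Set.contains bPreSet (PySem.List.slice s none (some 3)) with
    | false => rfl
    | true =>
      cases hs : PySem.Set.contains bSufSet (PySem.List.slice s (some 3) (some 6)) with
      | false => rfl
      | true =>
        rw [h6, hg]
        rfl

lemma aLoop_false (u : List Char) (rest : List (List Char)) (h : u.length ≠ 6) :
    aLoop (u :: rest) = false := by
  have h' : ¬ ((PySem.Chars.len u == 6) = true) := by
    simp only [PySem.Chars.len_eq, beq_iff_eq]
    omega
  rw [aLoop_cons, if_neg h']

-- the step case of the main induction: s = u ++ '-' :: v with no dash in u
lemma pvMainApp (n : Nat)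
    (ih : ∀ s : List Char, s.length ≤ n →
      aLoop ((pvSplitDash s).1 :: (pvSplitDash s).2) = bScan n s)
    (u v : List Char) (hu : ('-' : Char) ∉ u)
    (hle : (u ++ '-' :: v).length ≤ n + 1) :
    aLoop ((pvSplitDash (u ++ '-' :: v)).1 :: (pvSplitDash (u ++ '-' :: v)).2)
      = bScan (n + 1) (u ++ '-' :: v) := by
  rw [pvSplitDash_append u v hu]
  show aLoop (u :: (pvSplitDash v).1 :: (pvSplitDash v).2) = _
  by_cases h6 : u.length = 6
  · -- dash after a six-character chunk: both sides check it and continue on v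
    have hvle : v.length ≤ n := by
      simp only [List.length_append, List.length_cons] at hle
      omega
    have hul : (PySem.Chars.len u == 6) = true := by
      simp only [PySem.Chars.len_eq, beq_iff_eq]
      omega
    have hnl : ¬ (u ++ '-' :: v).length < 6 := by
      simp only [List.length_append, List.length_cons]
      omega
    have hwin : ('-' : Char) ∉ PySem.List.slice (u ++ '-' :: v) none (some 6) := by
      rw [PySem.List.slice_to _ (by norm_num), pvT6, List.take_append,
        List.take_of_length_le (show u.length ≤ 6 by omega),
        show (6 : Nat) - u.length = 0 by omega, List.take_zero, List.append_nil]
      exact hu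
    have htake : PySem.List.slice (u ++ '-' :: v) none (some 3)
        = PySem.List.slice u none (some 3) := by
      rw [PySem.List.slice_to _ (by norm_num), PySem.List.slice_to _ (by norm_num), pvT3,
        List.take_append, show (3 : Nat) - u.length = 0 by omega, List.take_zero,
        List.append_nil]
    have hdrop : PySem.List.slice (u ++ '-' :: v) (some 3) (some 6)
        = PySem.List.slice u (some 3) none := by
      rw [PySem.List.slice_toNat _ (by norm_num) (by norm_num),
        PySem.List.slice_from _ (by norm_num), pvT3, pvT6,
        show (6 : Nat) - 3 = 3 from rfl, List.drop_append,
        show (3 : Nat) - u.length = 0 by omega, List.drop_zero, List.take_append,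
        show (3 : Nat) - (u.drop 3).length = 0 by simp [h6], List.take_zero, List.append_nil]
      exact List.take_of_length_le (by simp [h6])
    have hg : PySem.List.pyGet? (u ++ '-' :: v) 6 = some '-' := by
      rw [show (6 : Int) = ((6 : Nat) : Int) by norm_num, PySem.List.pyGet?_natCast,
        List.getElem?_append_right (by omega), show (6 : Nat) - u.length = 0 by omega]
      rfl
    have hrest : PySem.List.slice (u ++ '-' :: v) (some 7) none = v := by
      rw [PySem.List.slice_from _ (by norm_num), pvT7, List.drop_append,
        List.drop_eq_nil_of_le (show u.length ≤ 7 by omega),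
        show (7 : Nat) - u.length = 1 by omega]
      simp
    rw [aLoop_cons, if_pos hul, ih v hvle, bScan_succ, if_neg hnl,
      pvIsInWin_false _ hwin, if_neg pvNotFT, htake, hdrop, hg, hrest,
      bPreSet_contains, bSufSet_contains,
      if_neg (show ¬ (((u ++ '-' :: v).length == 6) = true) by
        simp only [beq_iff_eq, List.length_append, List.length_cons]; omega),
      if_neg (show ¬ ((!(some '-' == some ('-' : Char))) = true) by simp)]
  · rw [aLoop_false u _ h6]
    by_cases hlen6 : (u ++ '-' :: v).length < 6
    · rw [bScan_succ, if_pos hlen6]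
    · by_cases hu6 : u.length < 6
      · -- the separating dash sits inside the first six-character window
        have hdm : ('-' : Char) ∈ PySem.List.slice (u ++ '-' :: v) none (some 6) := by
          rw [PySem.List.slice_to _ (by norm_num), pvT6, List.take_append,
            List.take_of_length_le (show u.length ≤ 6 by omega),
            show (6 : Nat) - u.length = (6 - u.length - 1) + 1 by omega, List.take_succ_cons]
          simp
        rw [bScan_false_win n _ hdm]
      · have hgt : 6 < u.length := by omega
        have hwin : ('-' : Char) ∉ PySem.List.slice (u ++ '-' :: v) none (some 6) := by
          rw [PySem.List.slice_to _ (by norm_num), pvT6, List.take_append,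
            List.take_eq_nil_iff.mpr (Or.inl (show (6 : Nat) - u.length = 0 by omega)),
            List.append_nil]
          intro hmem
          exact hu (List.take_subset _ _ hmem)
        have hg : PySem.List.pyGet? (u ++ '-' :: v) 6 = u[6]? := by
          rw [show (6 : Int) = ((6 : Nat) : Int) by norm_num, PySem.List.pyGet?_natCast,
            List.getElem?_append_left hgt]
        have hfin : PySem.List.pyGet? (u ++ '-' :: v) 6 ≠ some '-' := by
          intro hx
          rw [hg] at hx
          exact hu (List.mem_of_getElem? hx)
        rw [bScan_false_get n _ (by
          simp only [List.length_append, List.length_cons]; omega) hwin hfin]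

-- the main loop equivalence: A's per-segment loop over the split equals B's scan
lemma pvMain : ∀ (fuel : Nat) (s : List Char), s.length ≤ fuel →
    aLoop ((pvSplitDash s).1 :: (pvSplitDash s).2) = bScan fuel s := by
  intro fuel
  induction fuel with
  | zero =>
    intro s h
    have hs : s = [] := by cases s <;> simp_all
    subst hs
    simp [pvSplitDash, aLoop, bScan]
  | succ n ih =>
    intro s hle
    by_cases hdash : ('-' : Char) ∈ s
    · have hne : s.dropWhile (fun x => x != '-') ≠ [] := by
        intro hnil
        have := (List.dropWhile_eq_nil_iff.mp hnil) '-' hdash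
        simp at this
      cases hv : s.dropWhile (fun x => x != '-') with
      | nil => exact absurd hv hne
      | cons c v =>
        have hcp : (fun x => x != '-') ((s.dropWhile (fun x => x != '-')).head hne) = false :=
          List.head_dropWhile_not _ hne
        have hch : (s.dropWhile (fun x => x != '-')).head hne = c := by
          have h1 : (s.dropWhile (fun x => x != '-')).head? = some c := by rw [hv]; rfl
          rwa [List.head?_eq_some_head hne, Option.some_inj] at h1
        have hc : c = '-' := by simpa [hch] using hcp
        subst hc
        have hu : ('-' : Char) ∉ s.takeWhile (fun x => x != '-') := fun hm => by
          simpa using List.mem_takeWhile_imp hm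
        have hs2 : s = s.takeWhile (fun x => x != '-') ++ '-' :: v := by
          conv_lhs => rw [← List.takeWhile_append_dropWhile (p := fun x => x != '-') (l := s)]
          rw [hv]
        rw [hs2] at hle ⊢
        exact pvMainApp n ih _ v hu hle
    · rw [pvSplitDash_no_dash s hdash]
      show aLoop [s] = _
      have hwin : ('-' : Char) ∉ PySem.List.slice s none (some 6) := by
        rw [PySem.List.slice_to _ (by norm_num), pvT6]
        intro hmem
        exact hdash (List.take_subset _ _ hmem)
      by_cases h6 : s.length < 6
      · rw [aLoop_false s [] (by omega), bScan_succ, if_pos h6]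
      · by_cases he : s.length = 6
        · have hul : (PySem.Chars.len s == 6) = true := by
            simp only [PySem.Chars.len_eq, beq_iff_eq]
            omega
          have hb : (s.length == 6) = true := by
            simp only [beq_iff_eq]
            omega
          have hsl : PySem.List.slice s (some 3) none = PySem.List.slice s (some 3) (some 6) := by
            rw [PySem.List.slice_from s (by norm_num),
              PySem.List.slice_toNat s (by norm_num) (by norm_num), pvT3, pvT6,
              show (6 : Nat) - 3 = 3 from rfl,
              List.take_of_length_le (by simp only [List.length_drop]; omega)]
          rw [aLoop_cons, if_pos hul, bScan_succ, if_neg h6,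
            pvIsInWin_false _ hwin, if_neg pvNotFT, if_pos hb, hsl,
            bPreSet_contains, bSufSet_contains, show aLoop [] = true from rfl]
        · rw [aLoop_false s [] he]
          have hfin : PySem.List.pyGet? s 6 ≠ some '-' := by
            intro hx
            rw [show (6 : Int) = ((6 : Nat) : Int) by norm_num,
              PySem.List.pyGet?_natCast] at hx
            exact hdash (List.mem_of_getElem? hx)
          rw [bScan_false_get n s he hwin hfin]

lemma pvLen3_eq (s : List Char) : (PySem.Chars.len s == 3) = (s.length == 3) := by
  rw [Bool.eq_iff_iff]
  simp only [PySem.Chars.len_eq, beq_iff_eq]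
  omega

lemma pvCheckEq (p : String) : check_patp p = check_patp_alt p := by
  unfold check_patp check_patp_alt
  rw [bStrip_eq_aStrip, pvLen3_eq, bSufSet_contains, pvSplitOn_dash,
    pvMain (aStrip p.toList).length (aStrip p.toList) le_rfl]

-- ===== VERDICT (by name: the statement is the Claim_ definition above) =====
theorem check_patp_spec : Claim_equal_check_patp := by
  unfold Claim_equal_check_patp
  intro p _
  unfold Spec_check_patp
  exact pvCheckEq p
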